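-- pv_equiv track=rewrite | github.com/daniel-reich/turbo-robot | NJw4mENpSaMz3eqh2_21.py | is_undulating
-- ===== SOURCE A (Python) =====
-- def is_undulating(n):
--   s = str(n)
--   if len(s) < 3:
--     return False
--   if len(set(s)) != 2:
--     return False
--   a = s[0]
--   for i in s[1:]:
--     if a == i:
--       return False
--     a = i
--   return True
-- ===== SOURCE B (Python) =====
-- def is_undulating(n):
--     s = str(n)
--     if len(s) < 3:
--         return False
--     return s[0] != s[1] and all(c == s[i % 2] for i, c in enumerate(s))
-- ===== Notes on version B (the rewrite author's own statement) =====
-- stated objective: simpler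
-- what changed: Replaces the distinct-digit set count plus previous-character loop with a direct conformance check against the abab... pattern fixed by the first two characters.
import Mathlib
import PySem

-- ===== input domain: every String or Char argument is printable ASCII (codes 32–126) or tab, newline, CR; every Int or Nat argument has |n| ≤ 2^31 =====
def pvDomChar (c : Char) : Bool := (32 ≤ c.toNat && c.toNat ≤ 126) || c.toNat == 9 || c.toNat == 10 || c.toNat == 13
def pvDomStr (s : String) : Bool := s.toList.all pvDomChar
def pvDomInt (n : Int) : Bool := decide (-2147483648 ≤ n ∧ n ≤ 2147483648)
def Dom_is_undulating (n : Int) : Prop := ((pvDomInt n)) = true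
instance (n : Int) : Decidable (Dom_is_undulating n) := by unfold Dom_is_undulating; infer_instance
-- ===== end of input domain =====

-- B replaces A's distinct-digit set count plus previous-character loop with a direct
-- conformance check against the abab... pattern fixed by the first two characters (objective: simpler).

-- ===== PORT A =====
-- the 'for i in s[1:]' loop with accumulator a (previous character)
def pvAdvLoop (a : Char) : List Char → Bool
  | [] => true
  | i :: rest => if a == i then false else pvAdvLoop i rest

def is_undulating (n : Int) : Bool :=
  let s := (PySem.Int.toStr n).toList
  if s.length < 3 then false
  else if (PySem.Set.ofList s).length ≠ 2 then false
  else match s with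
    | [] => false  -- unreachable: length ≥ 3
    | a :: rest => pvAdvLoop a rest

-- ===== PORT B =====
-- all(c == s[i % 2] for i, c in enumerate(s)): expected character alternates x, y, x, y, ...
def pvAltChk (x y : Char) : List Char → Bool
  | [] => true
  | c :: rest => c == x && pvAltChk y x rest

def is_undulating_alt (n : Int) : Bool :=
  let s := (PySem.Int.toStr n).toList
  if s.length < 3 then false
  else match s with
    | a :: b :: _ => a != b && pvAltChk a b s
    | _ => false  -- unreachable: length ≥ 3

-- ===== PRECONDITION & SPEC =====
def Spec_is_undulating (n : Int) (out : Bool) : Prop := out = is_undulating_alt n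
instance (n : Int) (out : Bool) : Decidable (Spec_is_undulating n out) := by unfold Spec_is_undulating; infer_instance

-- ===== CLAIM (what is proved, stated in full; the proofs are below) =====
def Claim_equal_is_undulating : Prop := ∀ (n : Int), Dom_is_undulating n → Spec_is_undulating n (is_undulating n)

-- ===== LEMMAS AND PROOFS =====

theorem mem_of_altChk : ∀ (s : List Char) (x y : Char), pvAltChk x y s = true →
    ∀ c ∈ s, c = x ∨ c = y := by
  intro s
  induction s with
  | nil => intro x y _ c hc; cases hc
  | cons d rest ih =>
    intro x y h c hc
    simp only [pvAltChk, Bool.and_eq_true, beq_iff_eq] at h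
    rcases List.mem_cons.1 hc with hc | hc
    · left; rw [hc]; exact h.1
    · rcases ih y x h.2 c hc with h' | h'
      · right; exact h'
      · left; exact h'

theorem adv_of_altChk : ∀ (s : List Char) (x y : Char), x ≠ y →
    pvAltChk y x s = true → pvAdvLoop x s = true := by
  intro s
  induction s with
  | nil => intro x y _ _; rfl
  | cons c rest ih =>
    intro x y hxy h
    simp only [pvAltChk, Bool.and_eq_true, beq_iff_eq] at h
    have hc : c = y := h.1
    simp only [pvAdvLoop, beq_iff_eq, hc]
    rw [if_neg hxy]
    exact ih y x (Ne.symm hxy) h.2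

theorem altChk_of_adv : ∀ (s : List Char) (x y : Char), x ≠ y →
    (∀ c ∈ s, c = x ∨ c = y) → pvAdvLoop x s = true → pvAltChk y x s = true := by
  intro s
  induction s with
  | nil => intro _ _ _ _ _; rfl
  | cons c rest ih =>
    intro x y hxy hmem h
    simp only [pvAdvLoop, beq_iff_eq] at h
    by_cases hcx : x = c
    · simp [hcx] at h
    · rw [if_neg hcx] at h
      have hc : c = y := by
        rcases hmem c (by simp) with h' | h'
        · exact absurd h'.symm hcx
        · exact h'
      simp only [pvAltChk, hc, beq_self_eq_true, Bool.true_and]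
      exact ih y x (Ne.symm hxy) (fun d hd => (hmem d (List.mem_cons_of_mem c hd)).symm)
        (hc ▸ h)

theorem ofList_len_two {s : List Char} {a b : Char} (hab : a ≠ b)
    (ha : a ∈ s) (hb : b ∈ s) (hmem : ∀ c ∈ s, c = a ∨ c = b) :
    (PySem.Set.ofList s).length = 2 := by
  have hnd : (PySem.Set.ofList s).Nodup := PySem.Set.nodup_ofList s
  apply le_antisymm
  · have hsub : PySem.Set.ofList s ⊆ [a, b] := by
      intro x hx
      rcases hmem x ((PySem.Set.mem_ofList s x).1 hx) with h | h <;> simp [h]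
    exact (hnd.subperm hsub).length_le
  · have hsub : [a, b] ⊆ PySem.Set.ofList s := by
      intro x hx
      rcases List.mem_pair.1 hx with h | h <;> subst h
      · exact (PySem.Set.mem_ofList s _).2 ha
      · exact (PySem.Set.mem_ofList s _).2 hb
    have hnd2 : ([a, b] : List Char).Nodup := by simp [hab]
    exact (hnd2.subperm hsub).length_le

theorem key_iff (a b : Char) (rest : List Char) :
    ((PySem.Set.ofList (a :: b :: rest)).length = 2 ∧ pvAdvLoop a (b :: rest) = true) ↔
    (a ≠ b ∧ pvAltChk a b (a :: b :: rest) = true) := by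
  constructor
  · rintro ⟨hlen, hadv⟩
    simp only [pvAdvLoop, beq_iff_eq] at hadv
    by_cases hab : a = b
    · simp [hab] at hadv
    · rw [if_neg hab] at hadv
      refine ⟨hab, ?_⟩
      obtain ⟨x, y, hxy⟩ := List.length_eq_two.1 hlen
      have hmem : ∀ c ∈ (a :: b :: rest), c = a ∨ c = b := by
        have hax : a ∈ [x, y] := hxy ▸ (PySem.Set.mem_ofList _ a).2 (by simp)
        have hbx : b ∈ [x, y] := hxy ▸ (PySem.Set.mem_ofList _ b).2 (by simp)
        intro c hc
        have hcx : c ∈ [x, y] := hxy ▸ (PySem.Set.mem_ofList _ c).2 hc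
        rcases List.mem_pair.1 hax with h1 | h1 <;>
        rcases List.mem_pair.1 hbx with h2 | h2 <;>
        rcases List.mem_pair.1 hcx with h3 | h3 <;>
        simp_all
      simp only [pvAltChk, beq_self_eq_true, Bool.true_and]
      exact altChk_of_adv rest b a (Ne.symm hab)
        (fun c hc => ((hmem c (by simp [hc])).elim Or.inr Or.inl)) hadv
  · rintro ⟨hab, hchk⟩
    have hchk1 : pvAltChk b a (b :: rest) = true := by
      simpa [pvAltChk] using hchk
    have hmem : ∀ c ∈ (a :: b :: rest), c = a ∨ c = b := by
      intro c hc
      rcases List.mem_cons.1 hc with hc | hc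
      · left; exact hc
      · exact (mem_of_altChk (b :: rest) b a hchk1 c hc).elim Or.inr Or.inl
    have hadv : pvAdvLoop a (b :: rest) = true := adv_of_altChk (b :: rest) a b hab hchk1
    exact ⟨ofList_len_two hab (by simp) (by simp) hmem, hadv⟩

-- ===== VERDICT (by name: the statement is the Claim_ definition above) =====
theorem is_undulating_spec : Claim_equal_is_undulating := by
  intro n _
  unfold Spec_is_undulating is_undulating is_undulating_alt
  set s := (PySem.Int.toStr n).toList with hs
  by_cases hlen : s.length < 3
  · simp [hlen]
  · rw [if_neg hlen, if_neg hlen]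
    match s, hlen with
    | [], h => exact absurd (by simp) h
    | [a], h => exact absurd (by simp) h
    | [a, b], h => exact absurd (by simp) h
    | a :: b :: c :: rest, _ =>
      have h := key_iff a b (c :: rest)
      by_cases h2 : (PySem.Set.ofList (a :: b :: c :: rest)).length = 2
      · rw [if_neg (by simpa using h2)]
        show pvAdvLoop a (b :: c :: rest) =
          ((a != b) && pvAltChk a b (a :: b :: c :: rest))
        by_cases hadv : pvAdvLoop a (b :: c :: rest) = true
        · have hr := h.1 ⟨h2, hadv⟩
          simp [hadv, hr.2, bne_iff_ne, hr.1]
        · have hB : ¬ (a ≠ b ∧ pvAltChk a b (a :: b :: c :: rest) = true) := by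
            intro hx; exact hadv (h.2 hx).2
          simp only [Bool.not_eq_true] at hadv
          rw [hadv]
          rcases not_and_or.1 hB with hx | hx
          · simp [not_not.1 hx]
          · simp only [Bool.not_eq_true] at hx
            simp [hx]
      · rw [if_pos (by simpa using h2)]
        show false = ((a != b) && pvAltChk a b (a :: b :: c :: rest))
        have hB : ¬ (a ≠ b ∧ pvAltChk a b (a :: b :: c :: rest) = true) := by
          intro hx; exact h2 (h.2 hx).1
        rcases not_and_or.1 hB with hx | hx
        · simp [not_not.1 hx]
        · simp only [Bool.not_eq_true] at hx
          simp [hx]
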